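-- pv_equiv track=rewrite | github.com/jack-sneddon/FolderSitter | python/dirCompare.py | compare_folders
-- ===== SOURCE A (Python) =====
-- def compare_folders(folder1_checksums, folder2_checksums):
--     """
--     Compares two folders' checksums.
--     Args:
--         folder1_checksums (dict): Checksums of the first folder.
--         folder2_checksums (dict): Checksums of the second folder.
--     Returns:
--         dict: A comparison result including added, removed, and changed files.
--     """
--     folder1_files = set(folder1_checksums.keys())
--     folder2_files = set(folder2_checksums.keys())
--
--     added = folder2_files - folder1_files
--     removed = folder1_files - folder2_files
--     common = folder1_files & folder2_files
--
--     changed = {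
--         file for file in common
--         if folder1_checksums[file] != folder2_checksums[file]
--     }
--
--     return {
--         "added": sorted(added),
--         "removed": sorted(removed),
--         "changed": sorted(changed),
--     }
-- ===== SOURCE B (Python) =====
-- def compare_folders(folder1_checksums, folder2_checksums):
--     """Sort-and-merge: one linear merge scan over key-sorted items; no sets,
--     no membership tests, no final sorts (the outputs emerge already sorted)."""
--     items1 = sorted(folder1_checksums.items(), key=lambda kv: kv[0])
--     items2 = sorted(folder2_checksums.items(), key=lambda kv: kv[0])
--     added, removed, changed = [], [], []
--     i = j = 0
--     while i < len(items1) and j < len(items2):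
--         k1, v1 = items1[i]
--         k2, v2 = items2[j]
--         if k1 < k2:
--             removed.append(k1)
--             i += 1
--         elif k2 < k1:
--             added.append(k2)
--             j += 1
--         else:
--             if v1 != v2:
--                 changed.append(k1)
--             i += 1
--             j += 1
--     removed.extend(k for k, _ in items1[i:])
--     added.extend(k for k, _ in items2[j:])
--     return {"added": added, "removed": removed, "changed": changed}
-- ===== Notes on version B (the rewrite author's own statement) =====
-- stated objective: alternative
-- what changed: Replaces A's set algebra (two set differences, an intersection set, a set-comprehension filter and three final sorts) with a sort-and-merge: both item lists are sorted by key once and a single linear merge scan classifies every key as added/removed/changed, emitting the three lists already in sorted order.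
import Mathlib
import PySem

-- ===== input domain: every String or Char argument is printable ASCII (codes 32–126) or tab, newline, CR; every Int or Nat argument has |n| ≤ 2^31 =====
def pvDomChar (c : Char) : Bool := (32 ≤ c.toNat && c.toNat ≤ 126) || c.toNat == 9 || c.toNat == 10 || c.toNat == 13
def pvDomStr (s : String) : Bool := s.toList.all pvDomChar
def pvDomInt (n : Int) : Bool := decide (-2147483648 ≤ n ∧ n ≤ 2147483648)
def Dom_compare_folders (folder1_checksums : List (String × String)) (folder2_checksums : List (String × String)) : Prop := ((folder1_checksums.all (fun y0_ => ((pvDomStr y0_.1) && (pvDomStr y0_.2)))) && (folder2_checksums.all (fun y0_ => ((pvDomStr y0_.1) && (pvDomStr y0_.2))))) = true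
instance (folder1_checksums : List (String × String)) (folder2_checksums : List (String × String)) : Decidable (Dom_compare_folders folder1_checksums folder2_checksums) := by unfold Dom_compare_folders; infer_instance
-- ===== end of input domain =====

-- B replaces A's set algebra (two set differences, an intersection, a set-comprehension filter,
-- three final sorts) with sort-and-merge: sort both item lists by key once, then one linear merge
-- scan classifies every key as added/removed/changed, emitting the lists already sorted;
-- objective: alternative.

-- ===== PORT A =====
def compare_folders (folder1_checksums : List (String × String)) (folder2_checksums : List (String × String)) : List (String × List String) :=
  let d1 : PySem.Dict String String := PySem.Dict.mk folder1_checksums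
  let d2 : PySem.Dict String String := PySem.Dict.mk folder2_checksums
  let folder1_files : PySem.Set String := PySem.Set.ofList d1.keys
  let folder2_files : PySem.Set String := PySem.Set.ofList d2.keys
  let added : PySem.Set String := PySem.Set.diff folder2_files folder1_files
  let removed : PySem.Set String := PySem.Set.diff folder1_files folder2_files
  let common : PySem.Set String := PySem.Set.inter folder1_files folder2_files
  -- set comprehension over 'common' (a Set): kept as a filter of the Set's element list;
  -- only its sorted form is returned, so Python's hash iteration order cannot be observed
  let changed : PySem.Set String := common.filter (fun file => d1.getD file "" != d2.getD file "")
  [("added", PySem.List.sorted added (fun x => x) false),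
   ("removed", PySem.List.sorted removed (fun x => x) false),
   ("changed", PySem.List.sorted changed (fun x => x) false)]

-- ===== PORT B =====
-- the while-loop of Source B over indices i, j with the three accumulator lists;
-- recursion on the two suffixes items1[i:], items2[j:] replaces the indices,
-- and the two trailing extends are the base cases where one suffix is empty
def pvMergeB : List (String × String) → List (String × String) → List String → List String → List String → List String × List String × List String
  | [], l2, added, removed, changed => (added ++ l2.map Prod.fst, removed, changed)
  | (k1, v1) :: t1, l2, added, removed, changed =>
    match l2 with
    | [] => (added, removed ++ ((k1, v1) :: t1).map Prod.fst, changed)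
    | (k2, v2) :: t2 =>
      if k1 < k2 then pvMergeB t1 ((k2, v2) :: t2) added (removed ++ [k1]) changed
      else if k2 < k1 then pvMergeB ((k1, v1) :: t1) t2 (added ++ [k2]) removed changed
      else pvMergeB t1 t2 added removed (if v1 != v2 then changed ++ [k1] else changed)
  termination_by l1 l2 _ _ _ => l1.length + l2.length

def compare_folders_alt (folder1_checksums : List (String × String)) (folder2_checksums : List (String × String)) : List (String × List String) :=
  let items1 := PySem.List.sorted (PySem.Dict.mk folder1_checksums).items (fun kv => kv.1) false
  let items2 := PySem.List.sorted (PySem.Dict.mk folder2_checksums).items (fun kv => kv.1) false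
  let res := pvMergeB items1 items2 [] [] []
  [("added", res.1), ("removed", res.2.1), ("changed", res.2.2)]

-- ===== PRECONDITION & SPEC =====
-- Pre_ excludes association lists with a duplicated key: a Python dict cannot contain one,
-- so such lists do not encode any input A actually receives.
def Pre_compare_folders (folder1_checksums : List (String × String)) (folder2_checksums : List (String × String)) : Prop :=
  (folder1_checksums.map Prod.fst).Nodup ∧ (folder2_checksums.map Prod.fst).Nodup
instance (folder1_checksums : List (String × String)) (folder2_checksums : List (String × String)) : Decidable (Pre_compare_folders folder1_checksums folder2_checksums) := by unfold Pre_compare_folders; infer_instance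

def pvWitness_compare_folders : (List (String × String)) × (List (String × String)) :=
  ([("a.txt", "11"), ("b.txt", "22")], [("b.txt", "23"), ("c.txt", "33")])

def Spec_compare_folders (folder1_checksums : List (String × String)) (folder2_checksums : List (String × String)) (out : List (String × List String)) : Prop := out = compare_folders_alt folder1_checksums folder2_checksums
instance (folder1_checksums : List (String × String)) (folder2_checksums : List (String × String)) (out : List (String × List String)) : Decidable (Spec_compare_folders folder1_checksums folder2_checksums out) := by unfold Spec_compare_folders; infer_instance

-- ===== CLAIM (what is proved, stated in full; the proofs are below) =====
def Claim_equal_compare_folders : Prop := ∀ (folder1_checksums : List (String × String)) (folder2_checksums : List (String × String)), Dom_compare_folders folder1_checksums folder2_checksums → Pre_compare_folders folder1_checksums folder2_checksums → Spec_compare_folders folder1_checksums folder2_checksums (compare_folders folder1_checksums folder2_checksums)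

-- ===== LEMMAS AND PROOFS =====

theorem pv_not_mem_keys (k : String) (l : List (String × String))
    (h : ∀ kv ∈ l, k ≠ kv.1) : k ∉ l.map Prod.fst := by
  intro hm
  obtain ⟨kv, hkv, hk⟩ := List.mem_map.mp hm
  exact absurd hk.symm (h kv hkv)

theorem pv_strict (l : List (String × String)) (hle : l.Pairwise (fun a b => a.1 ≤ b.1))
    (hnd : (l.map Prod.fst).Nodup) : l.Pairwise (fun a b => a.1 < b.1) :=
  (hle.and (List.pairwise_map.mp hnd)).imp (fun h => lt_of_le_of_ne h.1 h.2)

theorem pvMergeB_spec (l1 l2 : List (String × String))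
    (h1 : l1.Pairwise (fun a b => a.1 < b.1)) (h2 : l2.Pairwise (fun a b => a.1 < b.1))
    (a r c : List String) :
    pvMergeB l1 l2 a r c =
      (a ++ (l2.filter (fun kv => !((l1.map Prod.fst).contains kv.1))).map Prod.fst,
       r ++ (l1.filter (fun kv => !((l2.map Prod.fst).contains kv.1))).map Prod.fst,
       c ++ (l1.filter (fun kv => (kv.2 != (PySem.Dict.mk l2).getD kv.1 "") && ((l2.map Prod.fst).contains kv.1))).map Prod.fst) := by
  induction l1, l2, a, r, c using pvMergeB.induct with
  | case1 l2 a r c => simp [pvMergeB]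
  | case2 k1 v1 t1 a r c => simp [pvMergeB]
  | case3 k1 v1 t1 a r c k2 v2 t2 hlt ih =>
    have h2' := List.pairwise_cons.mp h2
    have h1' := List.pairwise_cons.mp h1
    have hlb : ∀ kv ∈ (k2, v2) :: t2, k1 < kv.1 := by
      intro kv hkv
      rcases List.mem_cons.mp hkv with h | h
      · rw [h]; exact hlt
      · exact lt_trans hlt (h2'.1 kv h)
    have hnc : k1 ∉ ((k2, v2) :: t2).map Prod.fst :=
      pv_not_mem_keys k1 _ (fun kv hkv => (hlb kv hkv).ne)
    rw [show pvMergeB ((k1,v1)::t1) ((k2,v2)::t2) a r c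
        = pvMergeB t1 ((k2,v2)::t2) a (r ++ [k1]) c from by rw [pvMergeB]; simp [hlt]]
    rw [ih h1'.2 h2]
    simp only [Prod.mk.injEq]
    refine ⟨?_, ?_, ?_⟩
    · congr 2
      refine List.filter_congr ?_
      intro kv hkv
      simp [(hlb kv hkv).ne']
    · rw [List.append_assoc]
      congr 1
      rw [List.filter_cons, show (!((((k2,v2)::t2).map Prod.fst).contains (k1,v1).1)) = true from by
        simp only [Bool.not_eq_eq_eq_not, Bool.not_true, List.contains_eq_mem, decide_eq_false_iff_not]
        exact hnc]
      simp
    · congr 2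
      rw [List.filter_cons, show (((k1,v1).2 != (PySem.Dict.mk ((k2,v2)::t2)).getD (k1,v1).1 "")
            && ((((k2,v2)::t2).map Prod.fst).contains (k1,v1).1)) = false from by
        have : (((k2,v2)::t2).map Prod.fst).contains (k1,v1).1 = false := by
          simp only [List.contains_eq_mem, decide_eq_false_iff_not]; exact hnc
        rw [this, Bool.and_false]]
      simp
  | case4 k1 v1 t1 a r c k2 v2 t2 hnlt hlt ih =>
    have h2' := List.pairwise_cons.mp h2
    have h1' := List.pairwise_cons.mp h1
    have hlb : ∀ kv ∈ (k1, v1) :: t1, k2 < kv.1 := by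
      intro kv hkv
      rcases List.mem_cons.mp hkv with h | h
      · rw [h]; exact hlt
      · exact lt_trans hlt (h1'.1 kv h)
    have hnc : k2 ∉ ((k1, v1) :: t1).map Prod.fst :=
      pv_not_mem_keys k2 _ (fun kv hkv => (hlb kv hkv).ne)
    rw [show pvMergeB ((k1,v1)::t1) ((k2,v2)::t2) a r c
        = pvMergeB ((k1,v1)::t1) t2 (a ++ [k2]) r c from by rw [pvMergeB]; simp [hnlt, hlt]]
    rw [ih h1 h2'.2]
    simp only [Prod.mk.injEq]
    refine ⟨?_, ?_, ?_⟩
    · rw [List.append_assoc]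
      congr 1
      rw [List.filter_cons, show (!((((k1,v1)::t1).map Prod.fst).contains (k2,v2).1)) = true from by
        simp only [Bool.not_eq_eq_eq_not, Bool.not_true, List.contains_eq_mem, decide_eq_false_iff_not]
        exact hnc]
      simp
    · congr 2
      refine List.filter_congr ?_
      intro kv hkv
      simp [(hlb kv hkv).ne']
    · congr 2
      refine List.filter_congr ?_
      intro kv hkv
      have hne : kv.1 ≠ k2 := (hlb kv hkv).ne'
      have : (PySem.Dict.mk ((k2,v2)::t2)).getD kv.1 "" = (PySem.Dict.mk t2).getD kv.1 "" := by
        simp [PySem.Dict.getD, PySem.Dict.get?_mk_cons, Ne.symm hne]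
      rw [this]
      have hb : (kv.1 == k2) = false := beq_eq_false_iff_ne.mpr hne
      simp [hb]
  | case5 k1 v1 t1 a r c k2 v2 t2 hnlt hnlt2 ih =>
    have heq : k1 = k2 := le_antisymm (not_lt.mp hnlt2) (not_lt.mp hnlt)
    subst heq
    have h2' := List.pairwise_cons.mp h2
    have h1' := List.pairwise_cons.mp h1
    have IH := ih h1'.2 h2'.2
    have hadd : (((k1,v2)::t2).filter (fun kv => !((((k1,v1)::t1).map Prod.fst).contains kv.1))).map Prod.fst
        = (t2.filter (fun kv => !((t1.map Prod.fst).contains kv.1))).map Prod.fst := by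
      rw [List.filter_cons, show (!((((k1,v1)::t1).map Prod.fst).contains (k1,v2).1)) = false from by simp,
          if_neg (by decide)]
      exact congrArg (List.map Prod.fst)
        (List.filter_congr (fun kv hkv => by simp [((h2'.1 kv hkv).ne' : kv.1 ≠ k1)]))
    have hrem : (((k1,v1)::t1).filter (fun kv => !((((k1,v2)::t2).map Prod.fst).contains kv.1))).map Prod.fst
        = (t1.filter (fun kv => !((t2.map Prod.fst).contains kv.1))).map Prod.fst := by
      rw [List.filter_cons, show (!((((k1,v2)::t2).map Prod.fst).contains (k1,v1).1)) = false from by simp,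
          if_neg (by decide)]
      exact congrArg (List.map Prod.fst)
        (List.filter_congr (fun kv hkv => by simp [((h1'.1 kv hkv).ne' : kv.1 ≠ k1)]))
    have hch : (((k1,v1)::t1).filter (fun kv => (kv.2 != (PySem.Dict.mk ((k1,v2)::t2)).getD kv.1 "")
            && ((((k1,v2)::t2).map Prod.fst).contains kv.1))).map Prod.fst
        = (if v1 != v2 then [k1] else [])
            ++ (t1.filter (fun kv => (kv.2 != (PySem.Dict.mk t2).getD kv.1 "")
                  && ((t2.map Prod.fst).contains kv.1))).map Prod.fst := by
      have hhead : (((k1,v1).2 != (PySem.Dict.mk ((k1,v2)::t2)).getD (k1,v1).1 "")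
            && ((((k1,v2)::t2).map Prod.fst).contains (k1,v1).1)) = (v1 != v2) := by
        have hv2 : (PySem.Dict.mk ((k1,v2)::t2)).getD k1 "" = v2 := by
          simp [PySem.Dict.getD, PySem.Dict.get?_mk_cons]
        simp [hv2]
      have htail : t1.filter (fun kv => (kv.2 != (PySem.Dict.mk ((k1,v2)::t2)).getD kv.1 "")
            && ((((k1,v2)::t2).map Prod.fst).contains kv.1))
          = t1.filter (fun kv => (kv.2 != (PySem.Dict.mk t2).getD kv.1 "")
            && ((t2.map Prod.fst).contains kv.1)) := by
        refine List.filter_congr ?_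
        intro kv hkv
        have hne : kv.1 ≠ k1 := (h1'.1 kv hkv).ne'
        have hg : (PySem.Dict.mk ((k1,v2)::t2)).getD kv.1 "" = (PySem.Dict.mk t2).getD kv.1 "" := by
          simp [PySem.Dict.getD, PySem.Dict.get?_mk_cons, Ne.symm hne]
        rw [hg]
        have hb : (kv.1 == k1) = false := beq_eq_false_iff_ne.mpr hne
        simp [hb]
      rw [List.filter_cons, hhead, htail]
      by_cases hv : (v1 != v2) = true
      · rw [if_pos hv, if_pos hv]
        simp
      · rw [if_neg hv, if_neg hv]
        simp
    rw [pvMergeB, if_neg hnlt, if_neg hnlt2]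
    by_cases hv : (v1 != v2) = true
    · rw [if_pos hv]
      rw [dif_pos hv] at IH
      rw [IH]
      simp only [Prod.mk.injEq]
      refine ⟨by rw [hadd], by rw [hrem], ?_⟩
      rw [hch, if_pos hv]
      simp
    · rw [if_neg hv]
      rw [dif_neg hv] at IH
      rw [IH]
      simp only [Prod.mk.injEq]
      refine ⟨by rw [hadd], by rw [hrem], ?_⟩
      rw [hch, if_neg hv]
      simp

theorem compare_folders_spec_aux (f1 f2 : List (String × String))
    (hn1 : (f1.map Prod.fst).Nodup) (hn2 : (f2.map Prod.fst).Nodup) :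
    compare_folders f1 f2 = compare_folders_alt f1 f2 := by
  have hp1 : (PySem.List.sorted f1 (fun kv : String × String => kv.1) false).Perm f1 :=
    PySem.List.sorted_perm _ _ _
  have hp2 : (PySem.List.sorted f2 (fun kv : String × String => kv.1) false).Perm f2 :=
    PySem.List.sorted_perm _ _ _
  have hnd1 : ((PySem.List.sorted f1 (fun kv : String × String => kv.1) false).map Prod.fst).Nodup :=
    ((hp1.map Prod.fst).nodup_iff).mpr hn1
  have hnd2 : ((PySem.List.sorted f2 (fun kv : String × String => kv.1) false).map Prod.fst).Nodup :=
    ((hp2.map Prod.fst).nodup_iff).mpr hn2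
  have hs1 : (PySem.List.sorted f1 (fun kv : String × String => kv.1) false).Pairwise (fun a b => a.1 < b.1) :=
    pv_strict _ (PySem.List.sorted_pairwise _ _) hnd1
  have hs2 : (PySem.List.sorted f2 (fun kv : String × String => kv.1) false).Pairwise (fun a b => a.1 < b.1) :=
    pv_strict _ (PySem.List.sorted_pairwise _ _) hnd2
  have ho1 : PySem.Set.ofList (f1.map Prod.fst) = f1.map Prod.fst :=
    PySem.Set.ofList_eq_self_of_nodup _ hn1
  have ho2 : PySem.Set.ofList (f2.map Prod.fst) = f2.map Prod.fst :=
    PySem.Set.ofList_eq_self_of_nodup _ hn2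
  have hmem1 : ∀ x : String, ((PySem.List.sorted f1 (fun kv : String × String => kv.1) false).map Prod.fst).contains x
      = (f1.map Prod.fst).contains x := by
    intro x
    simp only [List.contains_eq_mem, (hp1.map Prod.fst).mem_iff]
  have hmem2 : ∀ x : String, ((PySem.List.sorted f2 (fun kv : String × String => kv.1) false).map Prod.fst).contains x
      = (f2.map Prod.fst).contains x := by
    intro x
    simp only [List.contains_eq_mem, (hp2.map Prod.fst).mem_iff]
  unfold compare_folders compare_folders_alt
  dsimp only
  rw [pvMergeB_spec _ _ hs1 hs2 [] [] []]
  dsimp only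
  simp only [List.nil_append, List.cons.injEq, Prod.mk.injEq, and_true, true_and]
  refine ⟨?_, ?_, ?_⟩
  · -- added
    have hxs : PySem.Set.diff (PySem.Set.ofList ((PySem.Dict.mk f2).keys)) (PySem.Set.ofList ((PySem.Dict.mk f1).keys))
        = (f2.filter (fun kv => !((f1.map Prod.fst).contains kv.1))).map Prod.fst := by
      show (PySem.Set.ofList (f2.map Prod.fst)).filter
          (fun x => !((PySem.Set.ofList (f1.map Prod.fst)).contains x)) = _
      rw [ho1, ho2, List.filter_map]
      rfl
    rw [hxs]
    have hfe : (PySem.List.sorted f2 (fun kv : String × String => kv.1) false).filter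
          (fun kv => !(((PySem.List.sorted f1 (fun kv : String × String => kv.1) false).map Prod.fst).contains kv.1))
        = (PySem.List.sorted f2 (fun kv : String × String => kv.1) false).filter
          (fun kv => !((f1.map Prod.fst).contains kv.1)) :=
      List.filter_congr (fun kv _ => by rw [hmem1])
    refine PySem.List.sorted_eq_of_perm_of_pairwise_lt _ _ _ ?_ ?_
    · rw [hfe]
      exact (hp2.filter _).map Prod.fst
    · exact List.pairwise_map.mpr (hs2.filter _)
  · -- removed
    have hxs : PySem.Set.diff (PySem.Set.ofList ((PySem.Dict.mk f1).keys)) (PySem.Set.ofList ((PySem.Dict.mk f2).keys))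
        = (f1.filter (fun kv => !((f2.map Prod.fst).contains kv.1))).map Prod.fst := by
      show (PySem.Set.ofList (f1.map Prod.fst)).filter
          (fun x => !((PySem.Set.ofList (f2.map Prod.fst)).contains x)) = _
      rw [ho1, ho2, List.filter_map]
      rfl
    rw [hxs]
    have hfe : (PySem.List.sorted f1 (fun kv : String × String => kv.1) false).filter
          (fun kv => !(((PySem.List.sorted f2 (fun kv : String × String => kv.1) false).map Prod.fst).contains kv.1))
        = (PySem.List.sorted f1 (fun kv : String × String => kv.1) false).filter
          (fun kv => !((f2.map Prod.fst).contains kv.1)) :=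
      List.filter_congr (fun kv _ => by rw [hmem2])
    refine PySem.List.sorted_eq_of_perm_of_pairwise_lt _ _ _ ?_ ?_
    · rw [hfe]
      exact (hp1.filter _).map Prod.fst
    · exact List.pairwise_map.mpr (hs1.filter _)
  · -- changed
    have hxs : List.filter (fun file => (PySem.Dict.mk f1).getD file "" != (PySem.Dict.mk f2).getD file "")
          (PySem.Set.inter (PySem.Set.ofList ((PySem.Dict.mk f1).keys)) (PySem.Set.ofList ((PySem.Dict.mk f2).keys)))
        = (f1.filter (fun kv => ((PySem.Dict.mk f1).getD kv.1 "" != (PySem.Dict.mk f2).getD kv.1 "")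
            && ((f2.map Prod.fst).contains kv.1))).map Prod.fst := by
      show List.filter _ ((PySem.Set.ofList (f1.map Prod.fst)).filter
          (fun x => (PySem.Set.ofList (f2.map Prod.fst)).contains x)) = _
      rw [ho1, ho2, List.filter_filter, List.filter_map]
      rfl
    rw [hxs]
    have hpred : ∀ kv ∈ f1,
        ((kv.2 != (PySem.Dict.mk (PySem.List.sorted f2 (fun kv : String × String => kv.1) false)).getD kv.1 "")
          && (((PySem.List.sorted f2 (fun kv : String × String => kv.1) false).map Prod.fst).contains kv.1))
        = (((PySem.Dict.mk f1).getD kv.1 "" != (PySem.Dict.mk f2).getD kv.1 "")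
          && ((f2.map Prod.fst).contains kv.1)) := by
      intro kv hkv
      have hg1 : (PySem.Dict.mk f1).getD kv.1 "" = kv.2 :=
        PySem.Dict.getD_of_mem_items (PySem.Dict.mk f1) hkv hn1 ""
      rw [hg1, hmem2]
      by_cases hc : kv.1 ∈ f2.map Prod.fst
      · obtain ⟨b, hb, hbk⟩ := List.mem_map.mp hc
        have hb2 : (kv.1, b.2) ∈ f2 := by rw [← hbk]; exact hb
        have hg2 : (PySem.Dict.mk f2).getD kv.1 "" = b.2 :=
          PySem.Dict.getD_of_mem_items (PySem.Dict.mk f2) hb2 hn2 ""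
        have hb2' : (kv.1, b.2) ∈ PySem.List.sorted f2 (fun kv : String × String => kv.1) false :=
          hp2.mem_iff.mpr hb2
        have hg2' : (PySem.Dict.mk (PySem.List.sorted f2 (fun kv : String × String => kv.1) false)).getD kv.1 "" = b.2 :=
          PySem.Dict.getD_of_mem_items _ hb2' hnd2 ""
        rw [hg2, hg2']
      · have : (f2.map Prod.fst).contains kv.1 = false := by
          simp only [List.contains_eq_mem, decide_eq_false_iff_not]; exact hc
        rw [this, Bool.and_false, Bool.and_false]
    have hfe : (PySem.List.sorted f1 (fun kv : String × String => kv.1) false).filter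
          (fun kv => (kv.2 != (PySem.Dict.mk (PySem.List.sorted f2 (fun kv : String × String => kv.1) false)).getD kv.1 "")
            && (((PySem.List.sorted f2 (fun kv : String × String => kv.1) false).map Prod.fst).contains kv.1))
        = (PySem.List.sorted f1 (fun kv : String × String => kv.1) false).filter
          (fun kv => ((PySem.Dict.mk f1).getD kv.1 "" != (PySem.Dict.mk f2).getD kv.1 "")
            && ((f2.map Prod.fst).contains kv.1)) :=
      List.filter_congr (fun kv hkv => hpred kv (hp1.mem_iff.mp hkv))
    refine PySem.List.sorted_eq_of_perm_of_pairwise_lt _ _ _ ?_ ?_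
    · rw [hfe]
      exact (hp1.filter _).map Prod.fst
    · exact List.pairwise_map.mpr (hs1.filter _)

-- ===== VERDICT (by name: the statement is the Claim_ definition above) =====
theorem compare_folders_spec : Claim_equal_compare_folders := by
  intro f1 f2 _ hpre
  exact compare_folders_spec_aux f1 f2 hpre.1 hpre.2
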